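-- pv_equiv track=rewrite | github.com/arj1211/aoc | 2024/day4/main.py | generate_kernels
-- ===== SOURCE A (Python) =====
-- from typing import Generator, List, Tuple
--
-- def generate_kernels(
--     data: List[List[chr]], size: Tuple[int, int] = (4, 4)
-- ) -> Generator[List[List[str]], None, None]:
--     # Assuming `data` is a m by n matrix
--     k_top_left_i, k_top_left_j = 0, 0
--     while k_top_left_i <= len(data) - size[0]:
--         M = [
--             d[k_top_left_j : k_top_left_j + size[1]]
--             for d in data[k_top_left_i : k_top_left_i + size[0]]
--         ]
--         M = ["".join(row) for row in M]
--         yield M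
--         k_top_left_j += 1
--         if k_top_left_j > len(data[0]) - size[1]:
--             k_top_left_j = 0
--             k_top_left_i += 1
-- ===== SOURCE B (Python) =====
-- from typing import Generator, List, Tuple
--
-- def generate_kernels(
--     data: List[List[chr]], size: Tuple[int, int] = (4, 4)
-- ) -> Generator[List[List[str]], None, None]:
--     n_i = len(data) - size[0] + 1
--     if n_i <= 0 or not data:
--         return
--     # Precompute the joined horizontal strip table once per row, then
--     # assemble each kernel from size[0] consecutive strips.
--     n_j = len(data[0]) - size[1] + 1
--     strips = [
--         ["".join(row[j : j + size[1]]) for j in range(n_j)] for row in data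
--     ]
--     for i in range(n_i):
--         for j in range(n_j):
--             yield [s[j] for s in strips[i : i + size[0]]]
-- ===== Notes on version B (the rewrite author's own statement) =====
-- stated objective: alternative
-- what changed: B precomputes a table of per-row joined horizontal strips once and then assembles each kernel by slicing size[0] consecutive strips, instead of A's manual while-loop counters that re-slice and re-join every block independently.
-- intended difference: When size[1] exceeds the width len(data[0]) (but size[0] <= len(data) so row offsets exist), A still yields one truncated kernel per row offset because its do-while column loop always runs once; B yields nothing, the intended behaviour since no full-width window fits. — e.g. on generate_kernels([["a"]], (1, 2)): A returns [["a"]], B returns []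
import Mathlib
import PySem

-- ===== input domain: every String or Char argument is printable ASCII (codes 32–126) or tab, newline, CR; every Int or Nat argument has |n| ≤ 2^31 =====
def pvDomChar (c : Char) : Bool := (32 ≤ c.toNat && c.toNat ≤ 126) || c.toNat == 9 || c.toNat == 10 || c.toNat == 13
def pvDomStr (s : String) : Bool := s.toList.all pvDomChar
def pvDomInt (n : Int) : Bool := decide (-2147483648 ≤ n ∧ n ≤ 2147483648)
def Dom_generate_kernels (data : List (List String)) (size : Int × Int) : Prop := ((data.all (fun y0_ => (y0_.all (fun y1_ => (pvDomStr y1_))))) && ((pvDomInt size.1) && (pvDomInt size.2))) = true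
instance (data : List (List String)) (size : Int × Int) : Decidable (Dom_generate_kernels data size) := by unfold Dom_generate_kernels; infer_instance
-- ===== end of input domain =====

-- B replaces A's manual while-loop counters by a precomputed table of per-row joined
-- horizontal strips from which each kernel is assembled by slicing (objective: alternative).

-- ===== PORT A =====
-- A's while loop over the cursor (k_top_left_i, k_top_left_j); each iteration yields one
-- kernel and advances the cursor.  `data[0]` is ported as `data.headD []`: Python raises
-- IndexError there exactly when data = [] (reachable only for size.1 ≤ 0), excluded by Pre_.
-- the kernel M yielded by A at cursor (i, j)
def gkM (data : List (List String)) (size : Int × Int) (i j : Int) : List String :=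
  (PySem.List.slice data (some i) (some (i + size.1))).map
    (fun d => PySem.Str.join "" (PySem.List.slice d (some j) (some (j + size.2))))

def gkLoop (data : List (List String)) (size : Int × Int) (i j : Int) :
    List (List String) :=
  if _h : i ≤ (data.length : Int) - size.1 then
    if j + 1 > ((data.headD []).length : Int) - size.2 then
      gkM data size i j :: gkLoop data size (i + 1) 0
    else
      gkM data size i j :: gkLoop data size i (j + 1)
  else []
  termination_by (((data.length : Int) - size.1 + 1 - i).toNat,
                  (((data.headD []).length : Int) - size.2 + 1 - j).toNat)
  decreasing_by
  · exact Prod.Lex.left _ _ (by omega)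
  · exact Prod.Lex.right _ (by omega)

def generate_kernels (data : List (List String)) (size : Int × Int) : List (List String) :=
  gkLoop data size 0 0

-- ===== PORT B =====
-- Source B: early-return when no row offset fits (n_i <= 0) or data is empty, else
-- precompute strips[i][j] = "".join(data[i][j:j+size[1]]), then yield the kernels
-- i-outer, j-inner by slicing size[0] consecutive strips.  `data[0]` follows the emptiness
-- guard, so `headD []` is exact; `s[j]` always has 0 ≤ j < len(s) in Source B, so `pyGetD … ""`
-- never takes its default.
def generate_kernels_alt (data : List (List String)) (size : Int × Int) :
    List (List String) :=
  if ((data.length : Int) - size.1 + 1 ≤ 0) ∨ data = [] then []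
  else
    let nj : Int := ((data.headD []).length : Int) - size.2 + 1
    let strips : List (List String) := data.map (fun row =>
      (PySem.List.pyRange 0 nj 1).map
        (fun j => PySem.Str.join "" (PySem.List.slice row (some j) (some (j + size.2)))))
    (PySem.List.pyRange 0 ((data.length : Int) - size.1 + 1) 1).flatMap (fun i =>
      (PySem.List.pyRange 0 nj 1).map (fun j =>
        (PySem.List.slice strips (some i) (some (i + size.1))).map
          (fun s => PySem.List.pyGetD s j "")))

-- ===== PRECONDITION & SPEC =====
-- Pre_ excludes only the inputs on which A raises IndexError: empty data with size.1 ≤ 0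
-- (the loop body then reads data[0]).
def Pre_generate_kernels (data : List (List String)) (size : Int × Int) : Prop :=
  ¬ (data = [] ∧ size.1 ≤ 0)
instance (data : List (List String)) (size : Int × Int) :
    Decidable (Pre_generate_kernels data size) := by unfold Pre_generate_kernels; infer_instance

def pvWitness_generate_kernels : List (List String) × (Int × Int) :=
  ([["a", "b"], ["c", "d"]], (2, 2))

-- When size[1] exceeds the width len(data[0]) but size[0] ≤ len(data), A still yields one
-- truncated kernel per row offset (its do-while column loop always runs once); B yields
-- nothing — the intended behaviour, since no full-width window fits.
def D_generate_kernels (data : List (List String)) (size : Int × Int) : Prop :=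
  data ≠ [] ∧ size.1 ≤ data.length ∧ ∀ r ∈ data.take 1, (r.length : Int) < size.2
instance (data : List (List String)) (size : Int × Int) :
    Decidable (D_generate_kernels data size) := by unfold D_generate_kernels; infer_instance

def Spec_generate_kernels (data : List (List String)) (size : Int × Int)
    (out : List (List String)) : Prop :=
  ¬ D_generate_kernels data size → out = generate_kernels_alt data size
instance (data : List (List String)) (size : Int × Int) (out : List (List String)) :
    Decidable (Spec_generate_kernels data size out) := by
  unfold Spec_generate_kernels; infer_instance

def pvDiffWitness_generate_kernels : List (List String) × (Int × Int) := ([["a"]], (1, 2))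
def pvDiffWitnessOut_generate_kernels : (List (List String)) × (List (List String)) :=
  ([["a"]], [])

-- ===== CLAIM (what is proved, stated in full; the proofs are below) =====
def Claim_unchanged_generate_kernels : Prop := ∀ (data : List (List String)) (size : Int × Int), Dom_generate_kernels data size → Pre_generate_kernels data size → Spec_generate_kernels data size (generate_kernels data size)
def Claim_changed_generate_kernels : Prop := Dom_generate_kernels (pvDiffWitness_generate_kernels.1) (pvDiffWitness_generate_kernels.2) ∧ Pre_generate_kernels (pvDiffWitness_generate_kernels.1) (pvDiffWitness_generate_kernels.2) ∧ D_generate_kernels (pvDiffWitness_generate_kernels.1) (pvDiffWitness_generate_kernels.2) ∧ generate_kernels (pvDiffWitness_generate_kernels.1) (pvDiffWitness_generate_kernels.2) = pvDiffWitnessOut_generate_kernels.1 ∧ generate_kernels_alt (pvDiffWitness_generate_kernels.1) (pvDiffWitness_generate_kernels.2) = pvDiffWitnessOut_generate_kernels.2 ∧ pvDiffWitnessOut_generate_kernels.1 ≠ pvDiffWitnessOut_generate_kernels.2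
def Claim_exact_generate_kernels : Prop := ∀ (data : List (List String)) (size : Int × Int), Dom_generate_kernels data size → Pre_generate_kernels data size → D_generate_kernels data size → generate_kernels data size ≠ generate_kernels_alt data size

-- ===== LEMMAS AND PROOFS =====

-- slicing commutes with map (the slice only looks at positions and the length)
theorem slice_map {α β : Type} (f : α → β) (xs : List α) (a? b? : Option Int) :
    PySem.List.slice (xs.map f) a? b? = (PySem.List.slice xs a? b?).map f := by
  simp [PySem.List.slice, List.map_take, List.map_drop]

-- inner loop: from column j ≤ T the loop sweeps columns j..T of row-offset i, then resumes at (i+1, 0)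
theorem gkLoop_inner (data : List (List String)) (size : Int × Int) (i j : Int)
    (hi : i ≤ (data.length : Int) - size.1)
    (hj0 : 0 ≤ j) (hj : j ≤ ((data.headD []).length : Int) - size.2) :
    gkLoop data size i j =
      ((PySem.List.pyRange j (((data.headD []).length : Int) - size.2 + 1) 1).map
        (gkM data size i)) ++ gkLoop data size (i + 1) 0 := by
  set T : Int := ((data.headD []).length : Int) - size.2 with hT
  have hlt : j < T + 1 := by omega
  rw [PySem.List.pyRange_one_cons hlt]
  by_cases hstep : T < j + 1
  · have hjT : j = T := by omega
    rw [gkLoop, dif_pos hi, if_pos hstep]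
    have hempty : PySem.List.pyRange (j + 1) (T + 1) 1 = [] := by
      have h1 := PySem.List.length_pyRange_one (j + 1) (T + 1)
      have h2 : (PySem.List.pyRange (j + 1) (T + 1) 1).length = 0 := by
        rw [h1]; omega
      exact List.eq_nil_of_length_eq_zero h2
    rw [hempty]
    simp only [List.map_cons, List.map_nil, List.singleton_append]
  · have hrec : gkLoop data size i (j + 1) =
        ((PySem.List.pyRange (j + 1) (T + 1) 1).map (gkM data size i)) ++
          gkLoop data size (i + 1) 0 :=
      gkLoop_inner data size i (j + 1) hi (by omega) (by omega)
    rw [gkLoop, dif_pos hi, if_neg hstep, hrec]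
    simp only [List.map_cons, List.cons_append]
  termination_by (((data.headD []).length : Int) - size.2 - j).toNat
  decreasing_by omega

-- outer loop: from row-offset i the loop sweeps all remaining row offsets
theorem gkLoop_outer (data : List (List String)) (size : Int × Int) (i : Int)
    (hT : 0 ≤ ((data.headD []).length : Int) - size.2) :
    gkLoop data size i 0 =
      (PySem.List.pyRange i ((data.length : Int) - size.1 + 1) 1).flatMap (fun i' =>
        (PySem.List.pyRange 0 (((data.headD []).length : Int) - size.2 + 1) 1).map
          (gkM data size i')) := by
  set N : Int := (data.length : Int) - size.1 with hN
  by_cases hi : i ≤ N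
  · have hlt : i < N + 1 := by omega
    rw [PySem.List.pyRange_one_cons hlt, List.flatMap_cons]
    rw [gkLoop_inner data size i 0 hi le_rfl hT]
    rw [gkLoop_outer data size (i + 1) hT]
  · rw [gkLoop, dif_neg (show ¬ i ≤ (data.length : Int) - size.1 by rw [← hN]; exact hi)]
    have hempty : PySem.List.pyRange i (N + 1) 1 = [] := by
      have h1 := PySem.List.length_pyRange_one i (N + 1)
      have : (PySem.List.pyRange i (N + 1) 1).length = 0 := by rw [h1]; omega
      exact List.eq_nil_of_length_eq_zero this
    rw [hempty]; rfl
  termination_by ((data.length : Int) - size.1 + 1 - i).toNat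
  decreasing_by omega

-- B's kernel equals A's kernel at every in-range column j
theorem kernel_eq (data : List (List String)) (size : Int × Int) (i j : Int)
    (hj0 : 0 ≤ j) (hj : j < ((data.headD []).length : Int) - size.2 + 1) :
    (PySem.List.slice
        (data.map (fun row =>
          (PySem.List.pyRange 0 (((data.headD []).length : Int) - size.2 + 1) 1).map
            (fun j => PySem.Str.join "" (PySem.List.slice row (some j) (some (j + size.2))))))
        (some i) (some (i + size.1))).map
      (fun s => PySem.List.pyGetD s j "") = gkM data size i j := by
  rw [slice_map, gkM, List.map_map]
  refine List.map_congr_left (fun row _ => ?_)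
  simp only [Function.comp]
  exact PySem.List.pyGetD_map_pyRange_of_nonneg _ _ _ _ hj0 hj

theorem gkLoop_cons (data : List (List String)) (size : Int × Int)
    (hi : (0:Int) ≤ (data.length : Int) - size.1) :
    ∃ t, gkLoop data size 0 0 = gkM data size 0 0 :: t := by
  rw [gkLoop]
  simp only [dif_pos hi]
  split
  · exact ⟨_, rfl⟩
  · exact ⟨_, rfl⟩

-- ===== VERDICT (by name: the statement is the Claim_ definition above) =====
theorem generate_kernels_spec : Claim_unchanged_generate_kernels := by
  intro data size _hdom hpre hnd
  unfold Pre_generate_kernels at hpre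
  unfold D_generate_kernels at hnd
  unfold generate_kernels generate_kernels_alt
  by_cases hdata : data = []
  · subst hdata
    have hs1 : (0:Int) < size.1 := by
      by_contra h; exact hpre ⟨rfl, by omega⟩
    have hc : ¬ ((0:Int) ≤ ((([] : List (List String)).length : Int)) - size.1) := by
      simp only [List.length_nil, Nat.cast_zero]; omega
    rw [gkLoop, dif_neg hc]
    simp
  · by_cases hN : size.1 ≤ (data.length : Int)
    · have hcond : ¬ (((data.length : Int) - size.1 + 1 ≤ 0) ∨ data = []) := by
        rintro (h | h)
        · omega
        · exact hdata h
      simp only [if_neg hcond]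
      have hT : 0 ≤ ((data.headD []).length : Int) - size.2 := by
        by_contra h
        refine hnd ⟨hdata, hN, fun r hr => ?_⟩
        have hr0 : r = data.headD [] := by
          cases data with
          | nil => exact absurd rfl hdata
          | cons a t => simpa using hr
        subst hr0
        omega
      rw [gkLoop_outer data size 0 hT]
      refine List.flatMap_congr (fun i hi => ?_)
      refine List.map_congr_left (fun j hj => ?_)
      have hjb := (PySem.List.mem_pyRange_one).mp hj
      exact (kernel_eq data size i j hjb.1 (by omega)).symm
    · -- no row offset fits: both sides are empty
      rw [gkLoop]
      rw [dif_neg (by omega : ¬ ((0:Int) ≤ (data.length : Int) - size.1))]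
      exact (if_pos (Or.inl (by omega))).symm

theorem generate_kernels_changed : Claim_changed_generate_kernels := by
  unfold Claim_changed_generate_kernels
  refine ⟨by decide, by decide, by decide, ?_, by decide, by decide⟩
  show generate_kernels [["a"]] (1, 2) = [["a"]]
  have h1 : gkLoop [["a"]] (1, 2) 1 0 = [] := by
    rw [gkLoop, dif_neg (by decide)]
  rw [generate_kernels, gkLoop, dif_pos (by decide), if_pos (by decide)]
  rw [show (0:Int) + 1 = 1 from rfl, h1]
  decide

theorem generate_kernels_tight : Claim_exact_generate_kernels := by
  intro data size _hdom _hpre hd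
  obtain ⟨hdata, hN, hW'⟩ := hd
  have hW : (((data.headD []).length : Int)) < size.2 := by
    refine hW' _ ?_
    cases data with
    | nil => exact absurd rfl hdata
    | cons a t => simp
  have halt : generate_kernels_alt data size = [] := by
    unfold generate_kernels_alt
    have hcond : ¬ (((data.length : Int) - size.1 + 1 ≤ 0) ∨ data = []) := by
      rintro (h | h)
      · omega
      · exact hdata h
    simp only [if_neg hcond]
    have hempty : PySem.List.pyRange 0 (((data.headD []).length : Int) - size.2 + 1) 1 = [] := by
      have h1 := PySem.List.length_pyRange_one 0 (((data.headD []).length : Int) - size.2 + 1)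
      have : (PySem.List.pyRange 0 (((data.headD []).length : Int) - size.2 + 1) 1).length = 0 := by
        rw [h1]; omega
      exact List.eq_nil_of_length_eq_zero this
    rw [hempty]
    simp [List.flatMap]
  obtain ⟨t, ht⟩ := gkLoop_cons data size (by omega)
  unfold generate_kernels
  rw [ht, halt]
  exact List.cons_ne_nil _ _
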